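-- pv_equiv track=rewrite | github.com/educorvi/ediapis | app/examples.py | create_navigations
-- ===== SOURCE A (Python) =====
-- def create_navigations(artikel):
--     naventries = []
--     page = 1
--     for i in artikel:
--         naventries.append("""<li class="page-item edi_active"><a class="page-link" href="#/services/%s">%s</a></li>""" % (i.get('id'), str(page)))
--         page += 1
--     navs = []
--     for i in range(len(artikel)):
--         navigation = """\
-- <nav aria-label="Navigation">
--   <ul class="pagination justify-content-center">"""
--         for k in range(len(naventries)):
--             naventry = naventries[k]
--             if i == k:
--                 naventry = naventry.replace(u'edi_active', u'active')
--             else: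
--                 naventry = naventry.replace(u'edi_active', u'')
--             navigation += naventry
--         navigation += """</ul></nav>"""
--         navs.append(navigation)
--     return navs
-- ===== SOURCE B (Python) =====
-- def create_navigations(artikel):
--     n = len(artikel)
--     raw = ['<li class="page-item edi_active"><a class="page-link" href="#/services/%s">%s</a></li>' % (a.get('id'), p)
--            for p, a in enumerate(artikel, 1)]
--     # cumulative prefixes: pre[i] = header + all inactive entries before position i
--     pre = ['<nav aria-label="Navigation">\n  <ul class="pagination justify-content-center">']
--     for r in raw:
--         pre.append(pre[-1] + r.replace('edi_active', ''))
--     # cumulative suffixes, built back to front: suf[i] = all inactive entries from position i on + footer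
--     suf = ['</ul></nav>']
--     for r in reversed(raw):
--         suf.append(r.replace('edi_active', '') + suf[-1])
--     suf.reverse()
--     return [pre[i] + raw[i].replace('edi_active', 'active') + suf[i + 1] for i in range(n)]
-- ===== Notes on version B (the rewrite author's own statement) =====
-- stated objective: alternative
-- what changed: B replaces A's per-nav rescan of the whole entry table (n concatenations and n replace calls per nav) by cumulative prefix strings built in a forward pass and cumulative suffix strings built back-to-front, so each nav is assembled from exactly three pieces: pre[i] + active entry + suf[i+1].
import Mathlib
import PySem

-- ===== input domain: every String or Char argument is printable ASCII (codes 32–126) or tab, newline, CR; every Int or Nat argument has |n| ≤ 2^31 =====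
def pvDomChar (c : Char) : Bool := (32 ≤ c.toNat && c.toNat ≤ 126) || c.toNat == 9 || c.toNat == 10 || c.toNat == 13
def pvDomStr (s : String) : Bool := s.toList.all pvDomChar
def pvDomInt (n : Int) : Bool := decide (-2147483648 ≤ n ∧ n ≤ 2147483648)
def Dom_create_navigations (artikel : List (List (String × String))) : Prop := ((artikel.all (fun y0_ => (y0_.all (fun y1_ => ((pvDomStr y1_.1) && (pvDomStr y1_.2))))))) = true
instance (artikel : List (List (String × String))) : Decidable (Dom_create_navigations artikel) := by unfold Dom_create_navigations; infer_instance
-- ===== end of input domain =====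

-- B assembles each nav from three pieces — a cumulative prefix string (forward pass), the active
-- entry, and a cumulative suffix string (backward pass) — instead of A's per-nav rescan of the
-- whole entry table (alternative algorithm; return value only, no mutation).

-- ===== PORT A =====
def create_navigations (artikel : List (List (String × String))) : List String :=
  let naventries := (artikel.foldl (fun (st : List String × Int) i =>
      (st.1 ++ ["<li class=\"page-item edi_active\"><a class=\"page-link\" href=\"#/services/" ++
        (match (PySem.Dict.mk i).get? "id" with | none => "None" | some s => s) ++
        "\">" ++ PySem.Int.toStr st.2 ++ "</a></li>"], st.2 + 1)) ([], 1)).1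
  (List.range artikel.length).foldl (fun navs i =>
    let navigation := "<nav aria-label=\"Navigation\">\n  <ul class=\"pagination justify-content-center\">"
    let navigation := naventries.zipIdx.foldl (fun nav p =>
      let naventry := if i == p.2 then PySem.Str.replace p.1 "edi_active" "active"
                      else PySem.Str.replace p.1 "edi_active" ""
      nav ++ naventry) navigation
    navs ++ [navigation ++ "</ul></nav>"]) []

-- ===== PORT B =====
-- pre[-1] / suf[-1] are read with getLastD "": both lists start nonempty and only grow, so this is
-- exactly Python's pre[-1]; pre[i], raw[i], suf[i+1] are read with getD "" (indices always in range).
def create_navigations_alt (artikel : List (List (String × String))) : List String :=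
  let n := artikel.length
  let raw := (PySem.List.enumerate artikel 1).map (fun p =>
    "<li class=\"page-item edi_active\"><a class=\"page-link\" href=\"#/services/" ++
      (match (PySem.Dict.mk p.2).get? "id" with | none => "None" | some s => s) ++
      "\">" ++ PySem.Int.toStr p.1 ++ "</a></li>")
  let pre := raw.foldl (fun pre r => pre ++ [pre.getLastD "" ++ PySem.Str.replace r "edi_active" ""])
      ["<nav aria-label=\"Navigation\">\n  <ul class=\"pagination justify-content-center\">"]
  let suf := raw.reverse.foldl (fun suf r => suf ++ [PySem.Str.replace r "edi_active" "" ++ suf.getLastD ""])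
      ["</ul></nav>"]
  let suf := suf.reverse
  (List.range n).map (fun i =>
    pre.getD i "" ++ PySem.Str.replace (raw.getD i "") "edi_active" "active" ++ suf.getD (i + 1) "")

-- ===== PRECONDITION & SPEC =====
def Spec_create_navigations (artikel : List (List (String × String))) (out : List String) : Prop :=
  out = create_navigations_alt artikel
instance (artikel : List (List (String × String))) (out : List String) : Decidable (Spec_create_navigations artikel out) := by
  unfold Spec_create_navigations; infer_instance

-- ===== CLAIM (what is proved, stated in full; the proofs are below) =====
def Claim_equal_create_navigations : Prop := ∀ (artikel : List (List (String × String))), Dom_create_navigations artikel → Spec_create_navigations artikel (create_navigations artikel)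

-- ===== LEMMAS AND PROOFS =====

-- the raw (placeholder) entry string of one article, as both programs build it
def rawS (d : List (String × String)) (p : Int) : String :=
  "<li class=\"page-item edi_active\"><a class=\"page-link\" href=\"#/services/" ++
    (match (PySem.Dict.mk d).get? "id" with | none => "None" | some s => s) ++
    "\">" ++ PySem.Int.toStr p ++ "</a></li>"

theorem foldA (l : List (List (String × String))) :
    ∀ (acc : List String) (pg : Int),
      l.foldl (fun (st : List String × Int) i =>
        (st.1 ++ ["<li class=\"page-item edi_active\"><a class=\"page-link\" href=\"#/services/" ++
          (match (PySem.Dict.mk i).get? "id" with | none => "None" | some s => s) ++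
          "\">" ++ PySem.Int.toStr st.2 ++ "</a></li>"], st.2 + 1)) (acc, pg)
      = (acc ++ (PySem.List.enumerate l pg).map (fun q => rawS q.2 q.1), pg + l.length) := by
  induction l with
  | nil => intro acc pg; simp [PySem.List.enumerate]
  | cons d t ih =>
    intro acc pg
    simp only [List.foldl_cons]
    rw [ih]
    rw [PySem.List.enumerate_cons, List.map_cons]
    simp only [Prod.mk.injEq]
    constructor
    · simp [rawS]
    · simp only [List.length_cons]; push_cast; ring

theorem strJoin_empty_nil : PySem.Str.join "" [] = "" := by
  simp [PySem.Str.join, PySem.Chars.join_nil]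

theorem strJoin_empty_cons (s : String) (r : List String) :
    PySem.Str.join "" (s :: r) = s ++ PySem.Str.join "" r := by
  cases r with
  | nil =>
    show PySem.Str.join "" [s] = s ++ PySem.Str.join "" []
    rw [PySem.Str.join, PySem.Str.join]
    simp [PySem.Chars.join_singleton, PySem.Chars.join_nil, String.ofList_toList]
  | cons t u =>
    rw [PySem.Str.join, PySem.Str.join]
    simp only [List.map_cons]
    rw [PySem.Chars.join_cons_cons]
    rw [show ("" : String).toList = [] from rfl]
    rw [List.append_nil, String.ofList_append, String.ofList_toList]

theorem strJoin_empty_append (a b : List String) :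
    PySem.Str.join "" (a ++ b) = PySem.Str.join "" a ++ PySem.Str.join "" b := by
  induction a with
  | nil => simp [strJoin_empty_nil]
  | cons x t ih =>
    rw [List.cons_append, strJoin_empty_cons, strJoin_empty_cons, ih, String.append_assoc]

theorem foldl_strAcc {α : Type} (g : α → String) :
    ∀ (l : List α) (init : String),
      l.foldl (fun nav x => nav ++ g x) init = init ++ PySem.Str.join "" (l.map g) := by
  intro l
  induction l with
  | nil =>
    intro init
    simp [PySem.Str.join, PySem.Chars.join_nil]
  | cons x t ih =>
    intro init
    simp only [List.foldl_cons, List.map_cons]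
    rw [ih, strJoin_empty_cons, String.append_assoc]

theorem foldl_push {α β : Type} (f : α → β) :
    ∀ (l : List α) (acc : List β),
      l.foldl (fun acc x => acc ++ [f x]) acc = acc ++ l.map f := by
  intro l
  induction l with
  | nil => intro acc; simp
  | cons x t ih => intro acc; simp [ih]

theorem assemble {α : Type} (F G : α → String) :
    ∀ (l : List α) (k i : Nat) (hi : i < l.length),
      (l.zipIdx k).map (fun p => if (k + i) == p.2 then F p.1 else G p.1)
        = (l.map G).take i ++ [F (l[i]'hi)] ++ (l.map G).drop (i + 1) := by
  intro l
  induction l with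
  | nil => intro k i hi; simp at hi
  | cons x t ih =>
    intro k i hi
    rw [List.zipIdx_cons, List.map_cons]
    cases i with
    | zero =>
      simp only [Nat.add_zero, beq_self_eq_true, if_pos]
      rw [List.map_congr_left (g := fun p => G p.1) ?_]
      · have : (t.zipIdx (k+1)).map (fun p => G p.1) = t.map G := by
          rw [show (fun (p : α × Nat) => G p.1) = (G ∘ Prod.fst) from rfl, ← List.map_map]
          congr 1
          exact List.zipIdx_map_fst (k+1) t
        rw [this]
        simp
      · intro p hp
        rcases p with ⟨a, j⟩
        have hj := (List.mem_zipIdx hp).1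
        have : (k == j) = false := by simp; omega
        simp [this]
    | succ i =>
      have hki : ((k + (i+1)) == k) = false := by simp
      simp only [hki, Bool.false_eq_true, if_false]
      have hi' : i < t.length := by simpa using Nat.succ_lt_succ_iff.mp hi
      rw [show k + (i + 1) = (k + 1) + i by omega, ih (k+1) i hi']
      simp

-- the list of values pre[-1] takes through B's forward loop (element i = state after i+1 steps)
def scanCat (f : String → String) : String → List String → List String
  | _, [] => []
  | last, r :: t => (last ++ f r) :: scanCat f (last ++ f r) t

-- likewise for the backward loop, which prepends f r to the running suffix
def scanCat2 (f : String → String) : String → List String → List String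
  | _, [] => []
  | last, r :: t => (f r ++ last) :: scanCat2 f (f r ++ last) t

theorem foldl_pre (f : String → String) :
    ∀ (l acc : List String) (x : String),
      l.foldl (fun pre r => pre ++ [pre.getLastD "" ++ f r]) (acc ++ [x])
      = (acc ++ [x]) ++ scanCat f x l := by
  intro l
  induction l with
  | nil => intro acc x; simp [scanCat]
  | cons r t ih =>
    intro acc x
    simp only [List.foldl_cons, List.getLastD_concat]
    rw [show (acc ++ [x]) ++ [x ++ f r] = (acc ++ [x]) ++ [x ++ f r] from rfl]
    have := ih (acc ++ [x]) (x ++ f r)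
    rw [this, scanCat]
    simp

theorem foldl_suf (f : String → String) :
    ∀ (l acc : List String) (x : String),
      l.foldl (fun suf r => suf ++ [f r ++ suf.getLastD ""]) (acc ++ [x])
      = (acc ++ [x]) ++ scanCat2 f x l := by
  intro l
  induction l with
  | nil => intro acc x; simp [scanCat2]
  | cons r t ih =>
    intro acc x
    simp only [List.foldl_cons, List.getLastD_concat]
    have := ih (acc ++ [x]) (f r ++ x)
    rw [this, scanCat2]
    simp

theorem scanCat2_length (f : String → String) :
    ∀ (l : List String) (last : String), (scanCat2 f last l).length = l.length := by
  intro l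
  induction l with
  | nil => intro last; simp [scanCat2]
  | cons r t ih => intro last; simp [scanCat2, ih]

theorem scanCat_getD (f : String → String) :
    ∀ (l : List String) (last : String) (i : Nat), i < l.length →
      (scanCat f last l).getD i "" = last ++ PySem.Str.join "" ((l.take (i+1)).map f) := by
  intro l
  induction l with
  | nil => intro last i hi; simp at hi
  | cons r t ih =>
    intro last i hi
    cases i with
    | zero =>
      simp [scanCat, strJoin_empty_cons, strJoin_empty_nil]
    | succ i =>
      have hi' : i < t.length := by simpa using Nat.succ_lt_succ_iff.mp hi
      show (scanCat f (last ++ f r) t).getD i "" = _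
      rw [ih (last ++ f r) i hi']
      simp only [List.take_succ_cons, List.map_cons]
      rw [strJoin_empty_cons, String.append_assoc]

theorem scanCat2_getD (f : String → String) :
    ∀ (l : List String) (last : String) (i : Nat), i < l.length →
      (scanCat2 f last l).getD i "" = PySem.Str.join "" (((l.take (i+1)).reverse).map f) ++ last := by
  intro l
  induction l with
  | nil => intro last i hi; simp at hi
  | cons r t ih =>
    intro last i hi
    cases i with
    | zero =>
      simp [scanCat2, strJoin_empty_cons, strJoin_empty_nil]
    | succ i =>
      have hi' : i < t.length := by simpa using Nat.succ_lt_succ_iff.mp hi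
      show (scanCat2 f (f r ++ last) t).getD i "" = _
      rw [ih (f r ++ last) i hi']
      simp only [List.take_succ_cons, List.reverse_cons, List.map_append, List.map_cons,
        List.map_nil]
      rw [strJoin_empty_append, strJoin_empty_cons, strJoin_empty_nil]
      simp [String.append_assoc]

theorem main_eq (artikel : List (List (String × String))) :
    create_navigations artikel = create_navigations_alt artikel := by
  simp only [create_navigations, create_navigations_alt]
  rw [foldA artikel [] 1, foldl_push]
  simp only [List.nil_append]
  set ENT := PySem.List.enumerate artikel 1 with hENT
  set RAW := ENT.map (fun q => rawS q.2 q.1) with hRAW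
  have hraws : ENT.map (fun p =>
      "<li class=\"page-item edi_active\"><a class=\"page-link\" href=\"#/services/" ++
        (match (PySem.Dict.mk p.2).get? "id" with | none => "None" | some s => s) ++
        "\">" ++ PySem.Int.toStr p.1 ++ "</a></li>") = RAW := by
    rw [hRAW]; rfl
  rw [hraws]
  have hlenENT : ENT.length = artikel.length := PySem.List.length_enumerate artikel 1
  have hlenRAW : RAW.length = artikel.length := by rw [hRAW]; simpa using hlenENT
  set HDR := "<nav aria-label=\"Navigation\">\n  <ul class=\"pagination justify-content-center\">" with hHDR
  set FTR := "</ul></nav>" with hFTR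
  set f : String → String := fun r => PySem.Str.replace r "edi_active" "" with hf
  -- characterise B's two cumulative lists
  have hpre : RAW.foldl (fun pre r => pre ++ [pre.getLastD "" ++ PySem.Str.replace r "edi_active" ""]) [HDR]
      = [HDR] ++ scanCat f HDR RAW := by
    have := foldl_pre f RAW [] HDR
    simpa using this
  have hsuf : RAW.reverse.foldl (fun suf r => suf ++ [PySem.Str.replace r "edi_active" "" ++ suf.getLastD ""]) [FTR]
      = [FTR] ++ scanCat2 f FTR RAW.reverse := by
    have := foldl_suf f RAW.reverse [] FTR
    simpa using this
  rw [hpre, hsuf]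
  -- getD facts
  have hpreD : ∀ i : Nat, i ≤ RAW.length →
      ([HDR] ++ scanCat f HDR RAW).getD i "" = HDR ++ PySem.Str.join "" ((RAW.take i).map f) := by
    intro i hi
    cases i with
    | zero => simp [strJoin_empty_nil]
    | succ i =>
      have hi' : i < RAW.length := by omega
      show (scanCat f HDR RAW).getD i "" = _
      rw [scanCat_getD f RAW HDR i hi']
  have hsufD : ∀ i : Nat, i ≤ RAW.length →
      (([FTR] ++ scanCat2 f FTR RAW.reverse).reverse).getD i ""
        = PySem.Str.join "" ((RAW.drop i).map f) ++ FTR := by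
    intro i hi
    rw [List.reverse_append]
    by_cases hin : i = RAW.length
    · subst hin
      have hl : (scanCat2 f FTR RAW.reverse).reverse.length = RAW.length := by
        simp [scanCat2_length]
      rw [List.getD_eq_getElem?_getD, List.getElem?_append_right (by omega)]
      simp [hl, strJoin_empty_nil]
    · have hilt : i < RAW.length := by omega
      have hl : (scanCat2 f FTR RAW.reverse).reverse.length = RAW.length := by
        simp [scanCat2_length]
      rw [List.getD_eq_getElem?_getD, List.getElem?_append_left (by omega)]
      have hlt2 : i < (scanCat2 f FTR RAW.reverse).reverse.length := by omega
      rw [List.getElem?_reverse (by simpa [scanCat2_length] using hilt)]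
      have hidx : (scanCat2 f FTR RAW.reverse).length - 1 - i < RAW.reverse.length := by
        simp [scanCat2_length]; omega
      rw [show ((scanCat2 f FTR RAW.reverse).length - 1 - i) = RAW.length - 1 - i by
        simp [scanCat2_length]]
      have := scanCat2_getD f RAW.reverse FTR (RAW.length - 1 - i) (by simpa using (by omega : RAW.length - 1 - i < RAW.length))
      rw [List.getElem?_eq_getElem (by simpa [scanCat2_length] using (by omega : RAW.length - 1 - i < RAW.length))]
      have hgetD := this
      rw [List.getD_eq_getElem?_getD, List.getElem?_eq_getElem (by simpa [scanCat2_length] using (by omega : RAW.length - 1 - i < RAW.length))] at hgetD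
      simp only [Option.getD_some] at hgetD ⊢
      rw [hgetD]
      congr 2
      rw [show RAW.length - 1 - i + 1 = RAW.length - i by omega]
      rw [List.take_reverse]
      simp only [List.reverse_reverse]
      rw [show RAW.length - (RAW.length - i) = i by omega]
  -- elementwise comparison
  apply List.ext_getElem
  · simp
  · intro j h1 h2
    have hj : j < artikel.length := by simpa using h1
    have hjE : j < ENT.length := by omega
    have hjR : j < RAW.length := by omega
    rw [List.getElem_map, List.getElem_map]
    simp only [List.getElem_range]
    rw [foldl_strAcc]
    have hasm := assemble (fun r => PySem.Str.replace r "edi_active" "active")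
      (fun r => PySem.Str.replace r "edi_active" "") RAW 0 j hjR
    simp only [Nat.zero_add] at hasm
    rw [hasm]
    -- B's j-th nav
    rw [hpreD j (by omega), hsufD (j+1) (by omega)]
    have hrawj : RAW.getD j "" = RAW[j]'hjR := by
      rw [List.getD_eq_getElem?_getD, List.getElem?_eq_getElem hjR]; rfl
    rw [hrawj]
    rw [strJoin_empty_append, strJoin_empty_append, strJoin_empty_cons, strJoin_empty_nil]
    simp [hf, String.append_assoc]

-- ===== VERDICT (by name: the statement is the Claim_ definition above) =====
theorem create_navigations_spec : Claim_equal_create_navigations := by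
  intro artikel _
  exact main_eq artikel
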